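-- pv_equiv track=rewrite | github.com/eronryabets/book_api | book_service/services/utils.py | split_text_into_pages_by_lines
-- ===== SOURCE A (Python) =====
-- def split_text_into_pages_by_lines(chapter_text, lines_per_page=20):
--     """
--     Разбивает текст одной главы на страницы по 20 (по умолчанию) строк на страницу.
--     :param chapter_text: Текст всей главы
--     :param lines_per_page: Сколько строк будет на одной "логической" странице
--     :return: Список страниц, где каждая страница — это строка текста, содержащая 10 строк
--     """
--     # Сначала чистим от лишних символов
--     # cleaned = clean_text(chapter_text)    # OLD
--     # Разбиваем по переносам строк
--     # lines = cleaned.split('\n')    # OLD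
--
--     # Стало (убрали clean_text):
--     lines = chapter_text.split('\n')    # NEW
--     # Убираем возможные пустые хвостовые строки (если нужно)
--     # lines = [l for l in lines if l.strip()]
--
--     pages = []
--     for i in range(0, len(lines), lines_per_page):
--         chunk = lines[i: i + lines_per_page]
--         # Склеиваем обратно
--         page_content = '\n'.join(chunk)
--         pages.append(page_content)
--
--     return pages
-- ===== SOURCE B (Python) =====
-- def split_text_into_pages_by_lines(chapter_text, lines_per_page=20):
--     """Stream the lines once into a running page buffer instead of slicing by index."""
--     pages = []
--     current = []
--     for line in chapter_text.split('\n'):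
--         current.append(line)
--         if len(current) == lines_per_page:
--             pages.append('\n'.join(current))
--             current = []
--     if current:
--         pages.append('\n'.join(current))
--     return pages
-- ===== Notes on version B (the rewrite author's own statement) =====
-- stated objective: alternative
-- what changed: B streams once over the split lines with a running page buffer that is flushed each time it reaches lines_per_page, instead of A's index arithmetic over range(0, len(lines), lines_per_page) with absolute slices.
-- outside the precondition, e.g. on split_text_into_pages_by_lines('x', -1): A returns [], B returns ['x']
import Mathlib
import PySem

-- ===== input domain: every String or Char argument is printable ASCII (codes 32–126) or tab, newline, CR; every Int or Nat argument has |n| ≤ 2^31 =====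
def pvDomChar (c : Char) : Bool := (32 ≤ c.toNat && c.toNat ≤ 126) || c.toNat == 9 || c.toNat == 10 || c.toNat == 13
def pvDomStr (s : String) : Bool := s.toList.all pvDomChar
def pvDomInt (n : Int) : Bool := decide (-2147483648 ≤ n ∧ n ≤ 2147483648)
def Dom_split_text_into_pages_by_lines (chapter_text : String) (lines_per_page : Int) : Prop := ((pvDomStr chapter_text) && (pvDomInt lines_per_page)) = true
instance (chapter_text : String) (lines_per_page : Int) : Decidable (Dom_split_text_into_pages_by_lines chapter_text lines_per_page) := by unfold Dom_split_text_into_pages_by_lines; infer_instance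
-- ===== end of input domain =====

-- B streams the split lines once through a running page buffer (flushed at lines_per_page)
-- instead of A's absolute-index slicing over range(0, len(lines), lines_per_page); same cost, different decomposition.

-- ===== PORT A =====
-- lines = chapter_text.split('\n'); the separator is the nonempty literal "\n", so split? is always `some` and getD [] is exact.
def split_text_into_pages_by_lines (chapter_text : String) (lines_per_page : Int) : List String :=
  let lines : List String := (PySem.Str.split? chapter_text "\n").getD []
  (PySem.List.pyRange 0 (lines.length : Int) lines_per_page).foldl
    (fun pages i =>
      let chunk := PySem.List.slice lines (some i) (some (i + lines_per_page))
      let page_content := PySem.Str.join "\n" chunk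
      pages ++ [page_content]) []

-- ===== PORT B =====
def split_text_into_pages_by_lines_alt (chapter_text : String) (lines_per_page : Int) : List String :=
  let st := ((PySem.Str.split? chapter_text "\n").getD []).foldl
    (fun (st : List String × List String) line =>
      let current := st.2 ++ [line]
      if (current.length : Int) = lines_per_page then
        (st.1 ++ [PySem.Str.join "\n" current], [])
      else
        (st.1, current)) ([], [])
  if st.2 ≠ [] then st.1 ++ [PySem.Str.join "\n" st.2] else st.1

-- ===== PRECONDITION & SPEC =====
-- Pre_ excludes non-positive lines_per_page: on 0 Python A raises ValueError (zero range step), and on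
-- negative values A's range(0, n, step) is empty so A returns [] — a degenerate corner where both []
-- and B's single whole-text page are defensible, and no caller asks for a non-positive page size.
def Pre_split_text_into_pages_by_lines (chapter_text : String) (lines_per_page : Int) : Prop :=
  1 ≤ lines_per_page
instance (chapter_text : String) (lines_per_page : Int) : Decidable (Pre_split_text_into_pages_by_lines chapter_text lines_per_page) := by unfold Pre_split_text_into_pages_by_lines; infer_instance

def pvWitness_split_text_into_pages_by_lines : String × Int := ("alpha\nbeta\ngamma", 2)

def Spec_split_text_into_pages_by_lines (chapter_text : String) (lines_per_page : Int) (out : List String) : Prop := out = split_text_into_pages_by_lines_alt chapter_text lines_per_page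
instance (chapter_text : String) (lines_per_page : Int) (out : List String) : Decidable (Spec_split_text_into_pages_by_lines chapter_text lines_per_page out) := by unfold Spec_split_text_into_pages_by_lines; infer_instance

-- ===== CLAIM (what is proved, stated in full; the proofs are below) =====
def Claim_equal_split_text_into_pages_by_lines : Prop := ∀ (chapter_text : String) (lines_per_page : Int), Dom_split_text_into_pages_by_lines chapter_text lines_per_page → Pre_split_text_into_pages_by_lines chapter_text lines_per_page → Spec_split_text_into_pages_by_lines chapter_text lines_per_page (split_text_into_pages_by_lines chapter_text lines_per_page)

-- ===== LEMMAS AND PROOFS =====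

-- The common shape both loops produce: pages of K lines each, joined with '\n' (K ≥ 1).
def pvChunk (K : Nat) : List String → List String
  | [] => []
  | x :: xs => PySem.Str.join "\n" ((x :: xs).take K) :: pvChunk K (xs.drop (K - 1))
termination_by l => l.length
decreasing_by simp only [List.length_drop, List.length_cons]; omega

lemma pvChunk_nil (K : Nat) : pvChunk K [] = [] := by unfold pvChunk; rfl

lemma pvChunk_cons (K : Nat) (x : String) (xs : List String) :
    pvChunk K (x :: xs) = PySem.Str.join "\n" ((x :: xs).take K) :: pvChunk K (xs.drop (K - 1)) := by
  conv_lhs => unfold pvChunk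

lemma pvChunk_ne_nil (K : Nat) (hK : 1 ≤ K) (l : List String) (h : l ≠ []) :
    pvChunk K l = PySem.Str.join "\n" (l.take K) :: pvChunk K (l.drop K) := by
  match l, h with
  | x :: xs, _ =>
    rw [pvChunk_cons, show K = (K - 1) + 1 by omega, List.drop_succ_cons]
    simp

lemma pvChunk_short (K : Nat) (l : List String) (h : l.length < K) (hne : l ≠ []) :
    pvChunk K l = [PySem.Str.join "\n" l] := by
  rw [pvChunk_ne_nil K (by omega) l hne, List.take_of_length_le (by omega),
      List.drop_eq_nil_of_le (by omega), pvChunk_nil]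

-- pyRange with positive step: peel the first index and shift the rest down by the step.
lemma pvRange_shift_cons (n k : Int) (hk : 0 < k) (hn : 0 < n) :
    PySem.List.pyRange 0 n k = 0 :: (PySem.List.pyRange 0 (n - k) k).map (· + k) := by
  have hq0 : 0 ≤ (n - 1) / k := Int.ediv_nonneg (by omega) (by omega)
  have h1 : (n - 0 + k - 1) / k = (n - 1) / k + 1 := by
    rw [show n - 0 + k - 1 = (n - 1) + 1 * k by ring, Int.add_mul_ediv_right _ _ hk.ne']
  have h2 : n - k - 0 + k - 1 = n - 1 := by ring
  rw [PySem.List.pyRange_of_pos 0 n hk, PySem.List.pyRange_of_pos 0 (n - k) hk]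
  simp only [if_pos hn, h1, h2]
  by_cases h : 0 < n - k
  · simp only [if_pos h]
    rw [show ((n - 1) / k + 1).toNat = ((n - 1) / k).toNat + 1 by omega,
        List.range_succ_eq_map]
    simp only [List.map_cons, List.map_map]
    congr 1
    · simp
    · apply List.map_congr_left
      intro a _
      simp only [Function.comp]
      push_cast
      ring
  · have hq : (n - 1) / k = 0 := Int.ediv_eq_zero_of_lt (by omega) (by omega)
    simp only [if_neg h, hq]
    simp [List.range_succ_eq_map]

lemma pvRange_nonpos (n k : Int) (hk : 0 < k) (hn : n ≤ 0) :
    PySem.List.pyRange 0 n k = [] := by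
  rw [PySem.List.pyRange_of_pos 0 n hk]
  simp [show ¬ (0 < n) by omega]

-- A's loop over range(0, len(lines), k) with absolute slices computes pvChunk.
lemma pvA_loop (k : Int) (hk : 1 ≤ k) :
    ∀ (lines acc : List String),
      (PySem.List.pyRange 0 (lines.length : Int) k).foldl
        (fun pages i => pages ++ [PySem.Str.join "\n" (PySem.List.slice lines (some i) (some (i + k)))]) acc
      = acc ++ pvChunk k.toNat lines := by
  suffices H : ∀ (N : Nat) (lines acc : List String), lines.length ≤ N →
      (PySem.List.pyRange 0 (lines.length : Int) k).foldl
        (fun pages i => pages ++ [PySem.Str.join "\n" (PySem.List.slice lines (some i) (some (i + k)))]) acc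
      = acc ++ pvChunk k.toNat lines by
    exact fun lines acc => H lines.length lines acc le_rfl
  intro N
  induction N with
  | zero =>
    intro lines acc hlen
    have hnil : lines = [] := List.length_eq_zero_iff.mp (by omega)
    subst hnil
    simp [pvRange_nonpos 0 k (by omega) le_rfl, pvChunk_nil]
  | succ N IH =>
    intro lines acc hlen
    rcases lines with _ | ⟨x, xs⟩
    · simp [pvRange_nonpos 0 k (by omega) le_rfl, pvChunk_nil]
    · set l := x :: xs with hl
      have hlN : l.length ≤ N + 1 := hlen
      have hlpos : 0 < (l.length : Int) := by simp [hl]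
      rw [pvRange_shift_cons _ k (by omega) hlpos]
      simp only [List.foldl_cons, List.foldl_map]
      have hhead : PySem.List.slice l (some 0) (some (0 + k)) = l.take k.toNat := by
        rw [zero_add, PySem.List.slice_zero_start, PySem.List.slice_to l (by omega)]
      rw [hhead]
      have hshift : ∀ (pages : List String), ∀ i ∈ PySem.List.pyRange 0 ((l.length : Int) - k) k,
          pages ++ [PySem.Str.join "\n" (PySem.List.slice l (some (i + k)) (some (i + k + k)))]
          = pages ++ [PySem.Str.join "\n" (PySem.List.slice (l.drop k.toNat) (some i) (some (i + k)))] := by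
        intro pages i hi
        have hi0 : 0 ≤ i := ((PySem.List.mem_pyRange_iff_of_pos (by omega) i).mp hi).1
        have e1 : PySem.List.slice l (some (i + k)) (some (i + k + k))
            = ((l.drop k.toNat).drop i.toNat).take k.toNat := by
          rw [PySem.List.slice_toNat l (by omega) (by omega), List.drop_drop]
          congr 1
          · omega
          · congr 1
            omega
        have e2 : PySem.List.slice (l.drop k.toNat) (some i) (some (i + k))
            = ((l.drop k.toNat).drop i.toNat).take k.toNat := by
          rw [PySem.List.slice_toNat _ hi0 (by omega)]
          congr 1
          omega
        rw [e1, e2]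
      rw [PySem.List.foldl_congr_mem _ _ _ _ hshift]
      have hrange : PySem.List.pyRange 0 ((l.length : Int) - k) k
          = PySem.List.pyRange 0 (((l.drop k.toNat).length : Int)) k := by
        by_cases h : (l.length : Int) ≤ k
        · rw [pvRange_nonpos _ k (by omega) (by omega),
              show ((l.drop k.toNat).length : Int) = 0 by rw [List.length_drop]; omega,
              pvRange_nonpos 0 k (by omega) le_rfl]
        · congr 1
          rw [List.length_drop]
          omega
      rw [hrange, IH (l.drop k.toNat) _ (by rw [List.length_drop]; omega)]
      rw [pvChunk_ne_nil k.toNat (by omega) l (by simp [hl])]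
      simp

-- B's buffered single pass computes pvChunk of (buffer ++ remaining lines).
lemma pvB_loop (k : Int) (hk : 1 ≤ k) :
    ∀ (lines cur pages : List String), cur.length < k.toNat →
      (let st := lines.foldl
          (fun (st : List String × List String) line =>
            let current := st.2 ++ [line]
            if (current.length : Int) = k then
              (st.1 ++ [PySem.Str.join "\n" current], [])
            else
              (st.1, current)) (pages, cur)
       if st.2 ≠ [] then st.1 ++ [PySem.Str.join "\n" st.2] else st.1)
      = pages ++ pvChunk k.toNat (cur ++ lines) := by
  intro lines
  induction lines with
  | nil =>
    intro cur pages hcur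
    rcases cur with _ | ⟨c, cs⟩
    · simp [pvChunk_nil]
    · simp only [List.foldl_nil, List.append_nil]
      rw [pvChunk_short k.toNat (c :: cs) hcur (by simp)]
      simp
  | cons l ls IH =>
    intro cur pages hcur
    simp only [List.foldl_cons]
    by_cases hfull : (((cur ++ [l]).length : Int)) = k
    · simp only [if_pos hfull]
      rw [IH [] _ (by simpa using hk)]
      have hne : cur ++ l :: ls ≠ [] := by simp
      rw [pvChunk_ne_nil k.toNat (by omega) (cur ++ l :: ls) hne]
      have hklen : k.toNat = cur.length + 1 := by simp at hfull; omega
      have htake : (cur ++ l :: ls).take k.toNat = cur ++ [l] := by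
        rw [hklen]
        rw [show cur ++ l :: ls = (cur ++ [l]) ++ ls by simp]
        rw [List.take_append_of_le_length (by simp)]
        simp
      have hdrop : (cur ++ l :: ls).drop k.toNat = ls := by
        rw [hklen, show cur ++ l :: ls = (cur ++ [l]) ++ ls by simp,
            List.drop_append_of_le_length (by simp)]
        simp
      rw [htake, hdrop]
      simp
    · simp only [if_neg hfull]
      rw [IH (cur ++ [l]) _ (by simp at hfull ⊢; omega)]
      simp

-- ===== VERDICT (by name: the statement is the Claim_ definition above) =====
theorem split_text_into_pages_by_lines_spec : Claim_equal_split_text_into_pages_by_lines := by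
  intro chapter_text lines_per_page _hDom hPre
  unfold Spec_split_text_into_pages_by_lines
  unfold split_text_into_pages_by_lines split_text_into_pages_by_lines_alt
  have hk : 1 ≤ lines_per_page := hPre
  set lines : List String := (PySem.Str.split? chapter_text "\n").getD [] with hlines
  rw [pvA_loop lines_per_page hk lines []]
  rw [pvB_loop lines_per_page hk lines [] [] (by simp; omega)]
  simp
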